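-- pv_equiv track=rewrite | github.com/Avery-Littlemore/random_exercises | count_pairs.py | count_pairs
-- ===== SOURCE A (Python) =====
-- def count_pairs(nums, target):
--     start = 0
--     end = len(nums) - 1
--     total = 0
--
--     while start < len(nums) - 1:
--         if nums[start] + nums[end] > target:
--             total += 1
--             end -= 1
--         else:
--             start += 1
--             end = len(nums) - 1
--
--         if start == end:
--             start += 1
--             end = len(nums) - 1
--
--     return total
-- ===== SOURCE B (Python) =====
-- def count_pairs(nums, target):
--     # For each start s, A counts the contiguous top run of indices e = n-1, n-2, ...
--     # with nums[s] + nums[e] > target, stopping at the first failure or at e == s.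
--     # That run length is (n-1) - max(f, s), where f is the LAST index whose value
--     # is <= target - nums[s] (f = -1 if none): every index above f succeeds.
--     n = len(nums)
--     total = 0
--     for s in range(n - 1):
--         t = target - nums[s]
--         f = -1
--         for e in range(n):
--             if nums[e] <= t:
--                 f = e
--         total += n - 1 - max(f, s)
--     return total
-- ===== Notes on version B (the rewrite author's own statement) =====
-- stated objective: alternative
-- what changed: replaces A's two-pointer while loop with manual end-resets by a per-start closed-form count: for each start s it adds n-1-max(f,s), where f is the last index whose value is <= target-nums[s], instead of simulating the pointer walk
import Mathlib
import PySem

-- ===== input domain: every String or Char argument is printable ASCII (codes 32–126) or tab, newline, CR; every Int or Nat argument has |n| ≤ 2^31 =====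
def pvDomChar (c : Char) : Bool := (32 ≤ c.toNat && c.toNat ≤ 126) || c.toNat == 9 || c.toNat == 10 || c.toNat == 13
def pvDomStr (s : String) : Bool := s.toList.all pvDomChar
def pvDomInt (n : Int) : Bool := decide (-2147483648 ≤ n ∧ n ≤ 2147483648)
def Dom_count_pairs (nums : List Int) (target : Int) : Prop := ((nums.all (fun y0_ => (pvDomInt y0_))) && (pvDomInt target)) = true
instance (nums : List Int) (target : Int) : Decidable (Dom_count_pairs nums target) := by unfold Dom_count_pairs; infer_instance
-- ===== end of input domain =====

-- B replaces A's two-pointer loop with manual resets by, for each start s, the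
-- closed-form top-run count n-1-max(f,s), f = last index with value ≤ target-nums[s];
-- objective: alternative (same asymptotic cost, no pointer simulation).

-- ===== PORT A =====
-- A's while loop, transliterated with the same state (start, end, total); the
-- fuel argument only makes the recursion total — (n+1)^2 exceeds the number of
-- iterations A ever performs (proved in the lemmas below), so it never runs out
-- on the actual initial state.  Indices stay Nat: on every state the Python
-- loop reaches they are ≥ 0 (start < end ≤ n-1 is an invariant), so Nat
-- subtraction and getD agree exactly with Python's nums[start], nums[end].
def loopA (nums : List Int) (target : Int) : Nat → Nat → Nat → Int → Int
  | 0, _, _, total => total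
  | fuel + 1, start, e, total =>
    if (start : Int) < (nums.length : Int) - 1 then
      if nums.getD start 0 + nums.getD e 0 > target then
        -- total += 1; end -= 1; then the shared `if start == end` reset
        let e' := e - 1
        if start = e' then loopA nums target fuel (start + 1) (nums.length - 1) (total + 1)
        else loopA nums target fuel start e' (total + 1)
      else
        -- start += 1; end = n-1; then the shared `if start == end` reset
        let s' := start + 1
        if s' = nums.length - 1 then loopA nums target fuel (s' + 1) (nums.length - 1) total
        else loopA nums target fuel s' (nums.length - 1) total
    else total

def count_pairs (nums : List Int) (target : Int) : Int :=
  loopA nums target ((nums.length + 1) * (nums.length + 1)) 0 (nums.length - 1) 0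

-- ===== PORT B =====
-- f = -1; for e in range(n): if nums[e] <= t: f = e
def fIdx (nums : List Int) (t : Int) : Int :=
  (List.range nums.length).foldl (fun f e => if nums.getD e 0 ≤ t then (e : Int) else f) (-1)

def count_pairs_alt (nums : List Int) (target : Int) : Int :=
  (List.range (nums.length - 1)).foldl
    (fun total s =>
      total + ((nums.length : Int) - 1 - max (fIdx nums (target - nums.getD s 0)) (s : Int)))
    0

-- ===== PRECONDITION & SPEC =====
def Spec_count_pairs (nums : List Int) (target : Int) (out : Int) : Prop := out = count_pairs_alt nums target
instance (nums : List Int) (target : Int) (out : Int) : Decidable (Spec_count_pairs nums target out) := by unfold Spec_count_pairs; infer_instance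

-- ===== CLAIM (what is proved, stated in full; the proofs are below) =====
def Claim_equal_count_pairs : Prop := ∀ (nums : List Int) (target : Int), Dom_count_pairs nums target → Spec_count_pairs nums target (count_pairs nums target)

-- ===== LEMMAS AND PROOFS =====

-- remaining contribution of the current start s from position e (e counts down)
def run (nums : List Int) (target : Int) (s : Nat) : Nat → Int
  | e =>
    if _h : s < e then
      if nums.getD s 0 + nums.getD e 0 > target then
        1 + (if e - 1 = s then 0 else run nums target s (e - 1))
      else 0
    else 0
  termination_by e => e
  decreasing_by omega

-- total contribution of starts s, s+1, …, n-2 (each begins at e = n-1)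
def tailSum (nums : List Int) (target : Int) : Nat → Int
  | s =>
    if _h : s + 1 < nums.length then
      run nums target s (nums.length - 1) + tailSum nums target (s + 1)
    else 0
  termination_by s => nums.length - s
  decreasing_by omega

-- last index ≤ e whose value is ≤ t, or -1
def mb (nums : List Int) (t : Int) : Nat → Int
  | e =>
    if nums.getD e 0 ≤ t then (e : Int)
    else if _h : e = 0 then -1 else mb nums t (e - 1)
  termination_by e => e
  decreasing_by omega

theorem mb_le (nums : List Int) (t : Int) (e : Nat) : mb nums t e ≤ (e : Int) := by
  induction e using Nat.strong_induction_on with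
  | _ e ih =>
    rw [mb]
    split
    · exact le_refl _
    · split
      · omega
      · have := ih (e - 1) (by omega)
        omega

theorem run_eq_mb (nums : List Int) (target : Int) (s : Nat) :
    ∀ e, s < e → run nums target s e = (e : Int) - max (mb nums (target - nums.getD s 0) e) (s : Int) := by
  intro e
  induction e using Nat.strong_induction_on with
  | _ e ih =>
    intro hse
    rw [run, dif_pos hse]
    by_cases hc : nums.getD s 0 + nums.getD e 0 > target
    · rw [if_pos hc]
      conv_rhs => rw [mb]
      rw [if_neg (by omega : ¬ nums.getD e 0 ≤ target - nums.getD s 0)]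
      rw [dif_neg (by omega : ¬ e = 0)]
      by_cases hes : e - 1 = s
      · rw [if_pos hes]
        have hmle := mb_le nums (target - nums.getD s 0) (e - 1)
        rw [hes] at hmle ⊢
        omega
      · rw [if_neg hes]
        rw [ih (e - 1) (by omega) (by omega)]
        omega
    · rw [if_neg hc]
      conv_rhs => rw [mb]
      rw [if_pos (by omega : nums.getD e 0 ≤ target - nums.getD s 0)]
      omega

theorem fIdx_eq_mb (nums : List Int) (t : Int) (hn : 1 ≤ nums.length) :
    fIdx nums t = mb nums t (nums.length - 1) := by
  unfold fIdx
  obtain ⟨m, hm⟩ : ∃ m, nums.length = m + 1 := ⟨nums.length - 1, by omega⟩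
  rw [hm]
  have key : ∀ k : Nat, (List.range (k + 1)).foldl (fun f e => if nums.getD e 0 ≤ t then (e : Int) else f) (-1) = mb nums t k := by
    intro k
    induction k with
    | zero =>
      simp [List.range_succ, mb]
    | succ k ihk =>
      rw [List.range_succ, List.foldl_append, ihk]
      simp only [List.foldl_cons, List.foldl_nil]
      by_cases hc : nums.getD (k + 1) 0 ≤ t
      · rw [if_pos hc]
        conv_rhs => rw [mb]
        rw [if_pos hc]
      · rw [if_neg hc]
        conv_rhs => rw [mb]
        rw [if_neg hc, dif_neg (by omega : ¬ k + 1 = 0)]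
        simp
  simpa using key m

theorem loopA_stop (nums : List Int) (target : Int) (fuel s e : Nat) (total : Int)
    (h : ¬ ((s : Int) < (nums.length : Int) - 1)) :
    loopA nums target fuel s e total = total := by
  cases fuel with
  | zero => rw [loopA]
  | succ f => rw [loopA, if_neg h]

-- main loop lemma: from a reachable state (s, e), with enough fuel, A's loop
-- adds exactly run s e (rest of current start) plus tailSum (s+1)
theorem loopA_eq (nums : List Int) (target : Int) :
    ∀ fuel s e total, s < e → e + 1 ≤ nums.length →
      (nums.length - s) * (nums.length + 1) + e < fuel →
      loopA nums target fuel s e total = total + run nums target s e + tailSum nums target (s + 1) := by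
  intro fuel
  induction fuel with
  | zero => intro s e total _ _ h; omega
  | succ fuel ih =>
    intro s e total hse hen hfuel
    have hn : 2 ≤ nums.length := by omega
    have hkey : (nums.length - (s + 1)) * (nums.length + 1) + (nums.length - 1) < fuel := by
      have h1 : nums.length - s = nums.length - (s + 1) + 1 := by omega
      have h2 : (nums.length - (s + 1) + 1) * (nums.length + 1)
          = (nums.length - (s + 1)) * (nums.length + 1) + (nums.length + 1) := by ring
      rw [h1, h2] at hfuel
      omega
    rw [loopA]
    rw [if_pos (by omega : (s : Int) < (nums.length : Int) - 1)]
    rw [run, dif_pos hse]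
    by_cases hc : nums.getD s 0 + nums.getD e 0 > target
    · rw [if_pos hc, if_pos hc]
      by_cases hes : s = e - 1
      · rw [if_pos hes, if_pos (by omega : e - 1 = s)]
        by_cases hlast : s + 1 + 1 < nums.length
        · rw [ih (s + 1) (nums.length - 1) (total + 1) (by omega) (by omega) (by omega)]
          conv_rhs => rw [tailSum]
          rw [dif_pos (by omega : s + 1 + 1 < nums.length)]
          ring
        · rw [loopA_stop nums target fuel (s + 1) (nums.length - 1) (total + 1)
            (by push_cast; omega)]
          conv_rhs => rw [tailSum]
          rw [dif_neg (by omega : ¬ s + 1 + 1 < nums.length)]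
          ring
      · rw [if_neg hes, if_neg (by omega : ¬ e - 1 = s)]
        rw [ih s (e - 1) (total + 1) (by omega) (by omega) (by omega)]
        ring
    · rw [if_neg hc, if_neg hc]
      by_cases hlast : s + 1 = nums.length - 1
      · rw [if_pos hlast]
        rw [loopA_stop nums target fuel (s + 1 + 1) (nums.length - 1) total
          (by push_cast; omega)]
        conv_rhs => rw [tailSum]
        rw [dif_neg (by omega : ¬ s + 1 + 1 < nums.length)]
        ring
      · rw [if_neg hlast]
        rw [ih (s + 1) (nums.length - 1) total (by omega) (by omega) (by omega)]
        conv_rhs => rw [tailSum]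
        rw [dif_pos (by omega : s + 1 + 1 < nums.length)]
        ring

theorem count_pairs_eq_tailSum (nums : List Int) (target : Int) :
    count_pairs nums target = tailSum nums target 0 := by
  unfold count_pairs
  by_cases hn : 2 ≤ nums.length
  · have hfuel : (nums.length - 0) * (nums.length + 1) + (nums.length - 1)
        < (nums.length + 1) * (nums.length + 1) := by
      have h2 : (nums.length + 1) * (nums.length + 1)
          = nums.length * (nums.length + 1) + (nums.length + 1) := by ring
      rw [Nat.sub_zero, h2]
      omega
    rw [loopA_eq nums target _ 0 (nums.length - 1) 0 (by omega) (by omega) hfuel]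
    conv_rhs => rw [tailSum]
    rw [dif_pos (by omega : 0 + 1 < nums.length)]
    ring
  · rw [loopA_stop nums target _ 0 (nums.length - 1) 0 (by push_cast; omega)]
    rw [tailSum, dif_neg (by omega : ¬ 0 + 1 < nums.length)]

-- B's fold from position s onward equals tailSum s
theorem alt_fold_eq_tailSum (nums : List Int) (target : Int) :
    ∀ k s total, s + k = nums.length - 1 →
      (List.range' s k).foldl
        (fun total s =>
          total + ((nums.length : Int) - 1 - max (fIdx nums (target - nums.getD s 0)) (s : Int)))
        total = total + tailSum nums target s := by
  intro k
  induction k with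
  | zero =>
    intro s total hs
    rw [List.range'_zero, List.foldl_nil, tailSum]
    rw [dif_neg (by omega : ¬ s + 1 < nums.length)]
    ring
  | succ k ihk =>
    intro s total hs
    have hn : 2 ≤ nums.length := by omega
    rw [List.range'_succ, List.foldl_cons]
    rw [ihk (s + 1) _ (by omega)]
    conv_rhs => rw [tailSum]
    rw [dif_pos (by omega : s + 1 < nums.length)]
    rw [run_eq_mb nums target s (nums.length - 1) (by omega)]
    rw [fIdx_eq_mb nums (target - nums.getD s 0) (by omega)]
    have hcast : ((nums.length - 1 : Nat) : Int) = (nums.length : Int) - 1 := by omega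
    rw [hcast]
    ring

-- ===== VERDICT (by name: the statement is the Claim_ definition above) =====
theorem count_pairs_spec : Claim_equal_count_pairs := by
  intro nums target _
  unfold Spec_count_pairs count_pairs_alt
  rw [count_pairs_eq_tailSum]
  have h := alt_fold_eq_tailSum nums target (nums.length - 1) 0 0 (by omega)
  rw [List.range_eq_range']
  rw [h]
  ring
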